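-- pv_equiv track=rewrite | github.com/dongsongshou/-code | 第二题.py | match_parentheses
-- ===== SOURCE A (Python) =====
-- class Node:
--     def __init__(self, ind, c):
--         self.ind = ind
--         self.c = c
--
-- def match_parentheses(A):
--     Q = []
--     B = [' ' for _ in A]
--
--     for i, c in enumerate(A):
--         if c == '(':
--             Q.append(Node(i, c))
--         elif c == ')':
--             if Q and Q[-1].c == '(':
--                 Q.pop()
--             else:
--                 B[i] = '?'
--                 continue
--         B[i] = ' '
--
--     while Q:
--         K = Q.pop()
--         B[K.ind] = 'x'
--
--     return A, B
-- ===== SOURCE B (Python) =====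
-- def match_parentheses(A):
--     B = [' ' for _ in A]
--     open_count = 0
--     for i, c in enumerate(A):
--         if c == '(':
--             open_count += 1
--         elif c == ')':
--             if open_count > 0:
--                 open_count -= 1
--             else:
--                 B[i] = '?'
--     close_count = 0
--     for i in range(len(A) - 1, -1, -1):
--         c = A[i]
--         if c == ')':
--             close_count += 1
--         elif c == '(':
--             if close_count > 0:
--                 close_count -= 1
--             else:
--                 B[i] = 'x'
--     return A, B
-- ===== Notes on version B (the rewrite author's own statement) =====
-- stated objective: simpler
-- what changed: Replaced the Node-object stack (push/pop plus a final stack-draining loop) by two integer counter passes: a forward pass marking unmatched ')' with '?', and a backward pass marking unmatched '(' with 'x'.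
import Mathlib
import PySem

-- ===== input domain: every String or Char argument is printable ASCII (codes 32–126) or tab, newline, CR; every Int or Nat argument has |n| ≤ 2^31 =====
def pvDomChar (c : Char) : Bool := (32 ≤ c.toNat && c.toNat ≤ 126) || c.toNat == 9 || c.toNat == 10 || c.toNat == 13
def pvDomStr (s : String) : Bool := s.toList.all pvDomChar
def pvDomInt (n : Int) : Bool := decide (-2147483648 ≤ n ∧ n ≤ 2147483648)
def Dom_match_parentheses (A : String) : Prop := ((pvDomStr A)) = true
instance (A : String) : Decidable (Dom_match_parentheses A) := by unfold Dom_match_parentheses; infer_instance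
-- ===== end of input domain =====

-- B replaces A's Node-object stack by two integer-counter passes (forward marks unmatched ')' with '?', backward marks unmatched '(' with 'x'); same O(n) cost, simpler code.


-- ===== PORT A =====
-- one iteration of A's for-loop: state = (stack Q of Node(ind, c) pairs, list B); stack top = list head
def maStep (st : List (Nat × Char) × List String) (p : Char × Nat) : List (Nat × Char) × List String :=
  if p.1 = '(' then ((p.2, p.1) :: st.1, st.2.set p.2 " ")
  else if p.1 = ')' then
    match st.1 with
    | (_, cj) :: Q' => if cj = '(' then (Q', st.2.set p.2 " ") else (st.1, st.2.set p.2 "?")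
    | [] => (st.1, st.2.set p.2 "?")
  else (st.1, st.2.set p.2 " ")

def match_parentheses (A : String) : String × List String :=
  let cs := A.toList
  let B0 := cs.map (fun _ => " ")                      -- B = [' ' for _ in A]
  let r := (cs.zipIdx).foldl maStep ([], B0)           -- for i, c in enumerate(A)
  (A, r.1.foldl (fun B K => B.set K.1 "x") r.2)        -- while Q: K = Q.pop(); B[K.ind] = 'x'

-- ===== PORT B =====
-- forward pass: open counter; unmatched ')' marked '?'
def mbFwd (st : Nat × List String) (p : Char × Nat) : Nat × List String :=
  if p.1 = '(' then (st.1 + 1, st.2)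
  else if p.1 = ')' then
    if st.1 > 0 then (st.1 - 1, st.2) else (st.1, st.2.set p.2 "?")
  else st

-- backward pass: close counter; unmatched '(' marked 'x'
def mbRev (st : Nat × List String) (p : Char × Nat) : Nat × List String :=
  if p.1 = ')' then (st.1 + 1, st.2)
  else if p.1 = '(' then
    if st.1 > 0 then (st.1 - 1, st.2) else (st.1, st.2.set p.2 "x")
  else st

def match_parentheses_alt (A : String) : String × List String :=
  let cs := A.toList
  let B0 := cs.map (fun _ => " ")
  let f := (cs.zipIdx).foldl mbFwd (0, B0)
  let r := ((cs.zipIdx).reverse).foldl mbRev (0, f.2)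
  (A, r.2)

-- ===== PRECONDITION & SPEC =====
def Spec_match_parentheses (A : String) (out : String × List String) : Prop := out = match_parentheses_alt A
instance (A : String) (out : String × List String) : Decidable (Spec_match_parentheses A out) := by unfold Spec_match_parentheses; infer_instance

-- ===== CLAIM (what is proved, stated in full; the proofs are below) =====
def Claim_equal_match_parentheses : Prop := ∀ (A : String), Dom_match_parentheses A → Spec_match_parentheses A (match_parentheses A)

-- ===== LEMMAS AND PROOFS =====

-- A's stack evolution, arrays ignored
def afoldQ : List (Char × Nat) → List (Nat × Char) → List (Nat × Char)
  | [], Q => Q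
  | (c, i) :: t, Q =>
    if c = '(' then afoldQ t ((i, c) :: Q)
    else if c = ')' then
      match Q with
      | (j, cj) :: Q' => if cj = '(' then afoldQ t Q' else afoldQ t ((j, cj) :: Q')
      | [] => afoldQ t []
    else afoldQ t Q

-- right-to-left summary of a chunk: (close counter, positions of unmatched '(' in position order)
def rstate : List (Char × Nat) → Nat × List Nat
  | [] => (0, [])
  | (c, i) :: t =>
    let s := rstate t
    if c = '(' then (if s.1 > 0 then (s.1 - 1, s.2) else (0, i :: s.2))
    else if c = ')' then (s.1 + 1, s.2)
    else s

def setAll (P : List Nat) (B : List String) : List String := P.foldl (fun B p => B.set p "x") B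

theorem setAll_set (P : List Nat) (B : List String) (p : Nat) :
    (setAll P B).set p "x" = setAll P (B.set p "x") := by
  induction P generalizing B with
  | nil => rfl
  | cons q t ih =>
    simp only [setAll, List.foldl_cons] at *
    rw [ih]
    rcases eq_or_ne q p with rfl | h
    · rfl
    · rw [List.set_comm _ _ h]

theorem foldr_set_eq_setAll (P : List Nat) (B : List String) :
    P.foldr (fun p B => B.set p "x") B = setAll P B := by
  induction P generalizing B with
  | nil => rfl
  | cons q t ih =>
    rw [List.foldr_cons, ih]
    simpa [setAll] using setAll_set t B q

theorem set_of_get (B : List String) (i : Nat) (h : B[i]? = some " ") : B.set i " " = B := by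
  apply List.ext_getElem?
  intro n
  rcases eq_or_ne i n with rfl | hne
  · have hlt : i < B.length := (List.getElem?_eq_some_iff.mp h).1
    rw [List.getElem?_eq_getElem hlt] at h
    simp [hlt, (Option.some.inj h).symm]
  · rw [List.getElem?_set_ne hne]

-- L0: the stack component of A's fold
theorem foldl_maStep_fst (l : List (Char × Nat)) (Q : List (Nat × Char)) (B : List String) :
    (l.foldl maStep (Q, B)).1 = afoldQ l Q := by
  induction l generalizing Q B with
  | nil => rfl
  | cons p t ih =>
    obtain ⟨c, i⟩ := p
    simp only [List.foldl_cons, maStep, afoldQ]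
    split_ifs with h1 h2
    · exact ih _ _
    · cases Q with
      | nil => exact ih [] _
      | cons q Q' =>
        obtain ⟨j, cj⟩ := q
        simp only []
        split_ifs with h3 <;> exact ih _ _
    · exact ih _ _

-- L2: B's backward pass (as a foldr) computes rstate and sets 'x' at its positions
theorem foldr_mbRev (l : List (Char × Nat)) (B : List String) :
    l.foldr (fun p st => mbRev st p) (0, B) = ((rstate l).1, setAll (rstate l).2 B) := by
  induction l generalizing B with
  | nil => rfl
  | cons p t ih =>
    obtain ⟨c, i⟩ := p
    rw [List.foldr_cons, ih]
    by_cases h1 : c = ')'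
    · simp [mbRev, rstate, h1]
    · by_cases h2 : c = '('
      · rcases Nat.eq_zero_or_pos (rstate t).1 with hz | hpos
        · simp only [mbRev, rstate, h2, hz]
          norm_num
          rw [setAll_set]
          rfl
        · simp [mbRev, rstate, h2, hpos]
      · simp [mbRev, rstate, h1, h2]

-- L1: A's final stack = unmatched-'(' positions of rstate (top-first), consuming the outer stack
theorem afoldQ_eq (l : List (Char × Nat)) (S : List (Nat × Char)) (hS : ∀ e ∈ S, e.2 = '(') :
    afoldQ l S = ((rstate l).2.reverse.map (fun i => (i, '('))) ++ S.drop (min (rstate l).1 S.length) := by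
  induction l generalizing S with
  | nil => simp [afoldQ, rstate]
  | cons p t ih =>
    obtain ⟨c, i⟩ := p
    by_cases h1 : c = '('
    · subst h1
      have hS' : ∀ e ∈ (i, '(') :: S, e.2 = '(' := by
        intro e he
        rcases List.mem_cons.mp he with rfl | he'
        · rfl
        · exact hS e he'
      rw [show afoldQ (('(', i) :: t) S = afoldQ t ((i, '(') :: S) by simp [afoldQ]]
      rw [ih ((i, '(') :: S) hS']
      rcases Nat.eq_zero_or_pos (rstate t).1 with hz | hpos
      · simp [rstate, hz]
      · have hne : ¬ (rstate t).1 = 0 := by omega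
        have hmin : min (rstate t).1 (S.length + 1) = min ((rstate t).1 - 1) S.length + 1 := by omega
        simp only [List.length_cons, hmin, List.drop_succ_cons]
        simp [rstate, hpos]
    · by_cases h2 : c = ')'
      · subst h2
        cases S with
        | nil =>
          rw [show afoldQ ((')', i) :: t) [] = afoldQ t [] by simp [afoldQ]]
          rw [ih [] (by simp)]
          simp [rstate]
        | cons q S' =>
          obtain ⟨j, cj⟩ := q
          have hq : cj = '(' := hS (j, cj) (by simp)
          subst hq
          rw [show afoldQ ((')', i) :: t) ((j, '(') :: S') = afoldQ t S' by simp [afoldQ]]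
          rw [ih S' (fun e he => hS e (List.mem_cons_of_mem _ he))]
          have hmin : min ((rstate t).1 + 1) (S'.length + 1) = min (rstate t).1 S'.length + 1 := by omega
          simp [rstate, hmin]
      · rw [show afoldQ ((c, i) :: t) S = afoldQ t S by simp [afoldQ, h1, h2]]
        rw [ih S hS]
        simp [rstate, h1, h2]

-- L3: forward passes build the same array
theorem foldl_fwd_eq (l : List (Char × Nat)) (Q : List (Nat × Char)) (B : List String) (o : Nat)
    (ho : o = Q.length) (hQ : ∀ e ∈ Q, e.2 = '(')
    (hB : ∀ p ∈ l, B[p.2]? = some " ") (hd : l.Pairwise (fun a b => a.2 ≠ b.2)) :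
    (l.foldl maStep (Q, B)).2 = (l.foldl mbFwd (o, B)).2 := by
  induction l generalizing Q B o with
  | nil => rfl
  | cons p t ih =>
    obtain ⟨c, i⟩ := p
    have hBi : B[i]? = some " " := hB (c, i) (by simp)
    have hd' : t.Pairwise (fun a b => a.2 ≠ b.2) := hd.of_cons
    have hdi : ∀ q ∈ t, i ≠ q.2 := fun q hq => (List.pairwise_cons.mp hd).1 q hq
    have hBt : ∀ p ∈ t, B[p.2]? = some " " := fun p hp => hB p (List.mem_cons_of_mem _ hp)
    rw [List.foldl_cons, List.foldl_cons]
    by_cases h1 : c = '('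
    · subst h1
      rw [show maStep (Q, B) ('(', i) = ((i, '(') :: Q, B.set i " ") by simp [maStep]]
      rw [show mbFwd (o, B) ('(', i) = (o + 1, B) by simp [mbFwd]]
      rw [set_of_get B i hBi]
      exact ih ((i, '(') :: Q) B (o + 1) (by simp [ho])
        (fun e he => by rcases List.mem_cons.mp he with rfl | he'; exacts [rfl, hQ e he'])
        hBt hd'
    · by_cases h2 : c = ')'
      · subst h2
        cases Q with
        | nil =>
          have ho0 : o = 0 := by simp [ho]
          subst ho0
          rw [show maStep ([], B) (')', i) = ([], B.set i "?") by simp [maStep]]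
          rw [show mbFwd (0, B) (')', i) = (0, B.set i "?") by simp [mbFwd]]
          exact ih [] (B.set i "?") 0 rfl (by simp)
            (fun p hp => by rw [List.getElem?_set_ne (hdi p hp)]; exact hBt p hp) hd'
        | cons q Q' =>
          obtain ⟨j, cj⟩ := q
          have hq : cj = '(' := hQ (j, cj) (by simp)
          subst hq
          have hopos : 0 < o := by simp [ho]
          rw [show maStep ((j, '(') :: Q', B) (')', i) = (Q', B.set i " ") by simp [maStep]]
          rw [show mbFwd (o, B) (')', i) = (o - 1, B) by simp [mbFwd, hopos]]
          rw [set_of_get B i hBi]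
          exact ih Q' B (o - 1) (by simp [ho]) (fun e he => hQ e (List.mem_cons_of_mem _ he)) hBt hd'
      · rw [show maStep (Q, B) (c, i) = (Q, B.set i " ") by simp [maStep, h1, h2]]
        rw [show mbFwd (o, B) (c, i) = (o, B) by simp [mbFwd, h1, h2]]
        rw [set_of_get B i hBi]
        exact ih Q B o ho hQ hBt hd'

theorem zipIdx_pairwise_lt {α : Type} (l : List α) (n : Nat) :
    (l.zipIdx n).Pairwise (fun a b => a.2 < b.2) := by
  induction l generalizing n with
  | nil => simp
  | cons a t ih =>
    rw [List.zipIdx_cons, List.pairwise_cons]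
    refine ⟨?_, ih (n + 1)⟩
    intro b hb
    obtain ⟨x, k⟩ := b
    have := List.mem_zipIdx hb
    omega

-- ===== VERDICT (by name: the statement is the Claim_ definition above) =====
theorem match_parentheses_spec : Claim_equal_match_parentheses := by
  intro A _
  unfold Spec_match_parentheses match_parentheses match_parentheses_alt
  simp only []
  set cs := A.toList with hcs
  set B0 := cs.map (fun _ => " ") with hB0
  set lz := cs.zipIdx with hlz
  have hrep : B0 = List.replicate cs.length " " := by
    rw [hB0, ← List.map_const]; rfl
  have hB : ∀ p ∈ lz, B0[p.2]? = some " " := by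
    intro p hp
    obtain ⟨x, k⟩ := p
    have := List.mem_zipIdx hp
    rw [hrep, List.getElem?_replicate]
    simp only
    have : k < cs.length := by omega
    simp [this]
  have hd : lz.Pairwise (fun a b => a.2 ≠ b.2) :=
    (zipIdx_pairwise_lt cs 0).imp (fun h => Nat.ne_of_lt h)
  have h3 := foldl_fwd_eq lz [] B0 0 rfl (by simp) hB hd
  have h0 := foldl_maStep_fst lz [] B0
  have h1 := afoldQ_eq lz [] (by simp)
  simp only [List.drop_nil, List.append_nil] at h1
  have h2 := foldr_mbRev lz ((lz.foldl mbFwd (0, B0)).2)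
  rw [List.foldl_reverse, h2]
  rw [h0, h1, h3]
  congr 1
  rw [List.foldl_map, List.foldl_reverse, foldr_set_eq_setAll]
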